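-- pv_equiv track=rewrite | github.com/lishuo1999/Baekjoon | 프로그래머스/lv1/42748. K번째수/K번째수.py | solution
-- ===== SOURCE A (Python) =====
-- def solution(array, commands):
--     answer = []
--     for i in range(len(commands)):
--         for j in range(3):
--             arr = array[commands[i][0]-1:commands[i][1]]
--             arr.sort()
--         answer.append(arr[commands[i][2]-1])
--     return answer
-- ===== SOURCE B (Python) =====
-- import bisect
--
-- def solution(array, commands):
--     answer = []
--     for cmd in commands:
--         s, e, k = cmd[0], cmd[1], cmd[2]
--         smallest = []
--         for x in array[s-1:e]:
--             bisect.insort(smallest, x)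
--             del smallest[k:]
--         answer.append(smallest[-1])
--     return answer
-- ===== Notes on version B (the rewrite author's own statement) =====
-- stated objective: alternative
-- what changed: A copies each slice and fully sorts it three times, then indexes; B makes a single pass over the slice maintaining a sorted buffer of only the k smallest elements (bisect.insort then trim to k), whose last entry is the answer.
-- outside the precondition, e.g. on solution([1, 2, 3], [[1, 3, 0]]): A returns [3], B raises IndexError
import Mathlib
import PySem

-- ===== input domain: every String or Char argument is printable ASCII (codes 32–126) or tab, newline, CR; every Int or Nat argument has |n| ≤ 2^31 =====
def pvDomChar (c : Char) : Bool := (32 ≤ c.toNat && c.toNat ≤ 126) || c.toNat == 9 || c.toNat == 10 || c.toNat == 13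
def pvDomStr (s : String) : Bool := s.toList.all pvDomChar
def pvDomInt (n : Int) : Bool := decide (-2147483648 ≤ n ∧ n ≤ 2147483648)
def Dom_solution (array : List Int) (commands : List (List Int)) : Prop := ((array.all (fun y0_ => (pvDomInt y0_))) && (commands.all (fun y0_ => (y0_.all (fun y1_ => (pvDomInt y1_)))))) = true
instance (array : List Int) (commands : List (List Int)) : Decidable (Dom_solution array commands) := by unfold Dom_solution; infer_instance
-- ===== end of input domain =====

-- B replaces A's triple full-sort-and-index of each slice by a single pass that keeps a sorted buffer
-- of the k smallest elements seen so far (bisect.insort + trim); same return values on Pre_ (alternative algorithm).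

-- ===== PORT A =====
-- body of A's outer loop (commands[i] passed in as cmd)
def stepA (array : List Int) (answer : List Int) (cmd : List Int) : List Int :=
  -- for j in range(3): arr = array[cmd[0]-1:cmd[1]]; arr.sort()
  let arr := (PySem.List.pyRange 0 3).foldl (fun _arr _j =>
    PySem.List.sorted (PySem.List.slice array (some (PySem.List.pyGetD cmd 0 0 - 1))
      (some (PySem.List.pyGetD cmd 1 0))) (fun x => x)) []
  -- answer.append(arr[cmd[2]-1])  (index in range under Pre_)
  answer ++ [PySem.List.pyGetD arr (PySem.List.pyGetD cmd 2 0 - 1) 0]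

def solution (array : List Int) (commands : List (List Int)) : List Int :=
  (PySem.List.pyRange 0 (PySem.List.len commands)).foldl
    (fun answer i => stepA array answer (PySem.List.pyGetD commands i [])) []

-- ===== PORT B =====
-- body of B's loop over commands
def stepB (array : List Int) (answer : List Int) (cmd : List Int) : List Int :=
  let s := PySem.List.pyGetD cmd 0 0
  let e := PySem.List.pyGetD cmd 1 0
  let k := PySem.List.pyGetD cmd 2 0
  -- for x in array[s-1:e]: bisect.insort(smallest, x); del smallest[k:]
  -- bisect.insort ported as PySem.List.insertBy (a < b): exact on Int elements of the sorted buffer;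
  -- del smallest[k:] keeps smallest[:k]
  let smallest := (PySem.List.slice array (some (s - 1)) (some e)).foldl
    (fun sm x => PySem.List.slice (PySem.List.insertBy (fun a b => decide (a < b)) x sm) none (some k)) []
  -- answer.append(smallest[-1])  (nonempty under Pre_)
  answer ++ [PySem.List.pyGetD smallest (-1) 0]

def solution_alt (array : List Int) (commands : List (List Int)) : List Int :=
  commands.foldl (stepB array) []

-- ===== PRECONDITION & SPEC =====
-- Pre_ excludes the inputs where A raises (a command shorter than 3 entries, or index k-1 outside the
-- sorted slice) and the accidental negative-k wraparound reads (1-len ≤ k ≤ 0), where A returns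
-- arr[k-1] counted from the END of the slice — there B's buffer is trimmed away and raises IndexError.
def Pre_solution (array : List Int) (commands : List (List Int)) : Prop :=
  ∀ cmd ∈ commands, 3 ≤ cmd.length ∧
    1 ≤ PySem.List.pyGetD cmd 2 0 ∧
    PySem.List.pyGetD cmd 2 0 ≤ ((PySem.List.slice array (some (PySem.List.pyGetD cmd 0 0 - 1))
      (some (PySem.List.pyGetD cmd 1 0))).length : Int)
instance (array : List Int) (commands : List (List Int)) : Decidable (Pre_solution array commands) := by
  unfold Pre_solution; infer_instance

def pvWitness_solution : List Int × List (List Int) := ([5, 2, 3], [[1, 3, 2]])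

def Spec_solution (array : List Int) (commands : List (List Int)) (out : List Int) : Prop := out = solution_alt array commands
instance (array : List Int) (commands : List (List Int)) (out : List Int) : Decidable (Spec_solution array commands out) := by unfold Spec_solution; infer_instance

-- ===== CLAIM (what is proved, stated in full; the proofs are below) =====
def Claim_equal_solution : Prop := ∀ (array : List Int) (commands : List (List Int)), Dom_solution array commands → Pre_solution array commands → Spec_solution array commands (solution array commands)

-- ===== LEMMAS AND PROOFS =====

lemma take_cons_take (a : Int) (l : List Int) (m : Nat) :
    (a :: l.take m).take m = (a :: l).take m := by
  cases m with
  | zero => rfl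
  | succ t => simp [List.take_succ_cons, List.take_take]

-- taking n after inserting into the pre-trimmed buffer = taking n after inserting into the full list
lemma take_insertBy_take (x : Int) :
    ∀ (l : List Int) (n : Nat),
      (PySem.List.insertBy (fun a b => decide (a < b)) x (l.take n)).take n
        = (PySem.List.insertBy (fun a b => decide (a < b)) x l).take n := by
  intro l
  induction l with
  | nil => intro n; simp
  | cons a l ih =>
    intro n
    cases n with
    | zero => simp
    | succ m =>
      simp only [List.take_succ_cons, PySem.List.insertBy]
      by_cases h : x < a
      · simp only [h, decide_true, if_pos, List.take_succ_cons, take_cons_take]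
      · simp only [h, decide_false, if_neg, Bool.false_eq_true, not_false_iff,
          List.take_succ_cons, ih m]

-- the insert-then-trim fold computes take n of the untrimmed insertion fold
lemma foldl_insert_trim (n : Nat) :
    ∀ (xs s : List Int),
      xs.foldl (fun sm x => (PySem.List.insertBy (fun a b => decide (a < b)) x sm).take n) (s.take n)
        = (xs.foldl (fun acc x => PySem.List.insertBy (fun a b => decide (a < b)) x acc) s).take n := by
  intro xs
  induction xs with
  | nil => intro s; rfl
  | cons x xs ih =>
    intro s
    simp only [List.foldl_cons]
    rw [take_insertBy_take, ih]

-- B's buffer is the first k elements of the sorted slice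
lemma buffer_eq (xs : List Int) (k : Int) (hk : 0 ≤ k) :
    xs.foldl (fun sm x => PySem.List.slice (PySem.List.insertBy (fun a b => decide (a < b)) x sm) none (some k)) []
      = (PySem.List.sorted xs (fun x => x)).take k.toNat := by
  have hfun : (fun (sm : List Int) (x : Int) =>
      PySem.List.slice (PySem.List.insertBy (fun a b => decide (a < b)) x sm) none (some k))
      = (fun sm x => (PySem.List.insertBy (fun a b => decide (a < b)) x sm).take k.toNat) := by
    funext sm x
    rw [PySem.List.slice_to _ hk]
  rw [hfun, show ([] : List Int) = ([] : List Int).take k.toNat from by simp,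
    foldl_insert_trim, PySem.List.sorted_eq_foldl_insertBy]

-- last element of the k-element buffer = k-th element of the sorted list
lemma pick_eq (S : List Int) (k : Int) (hk1 : 1 ≤ k) (hk2 : k ≤ (S.length : Int)) :
    PySem.List.pyGetD (S.take k.toNat) (-1) 0 = PySem.List.pyGetD S (k - 1) 0 := by
  have hkn1 : 1 ≤ k.toNat := by omega
  have hkn2 : k.toNat ≤ S.length := by omega
  have hlen : (S.take k.toNat).length = k.toNat := by
    simp [hkn2]
  have hne : S.take k.toNat ≠ [] := by
    intro h
    rw [h] at hlen
    simp at hlen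
    omega
  rw [PySem.List.pyGetD_neg_one _ _ hne, List.getLast_eq_getElem,
    PySem.List.pyGetD_eq_getElem _ _ (by omega) (by omega)]
  simp only [List.getElem_take]
  congr 1
  omega

-- per-command agreement of the two loop bodies
lemma step_eq (array : List Int) (cmd : List Int) (ans : List Int)
    (hk1 : 1 ≤ PySem.List.pyGetD cmd 2 0)
    (hk2 : PySem.List.pyGetD cmd 2 0 ≤ ((PySem.List.slice array (some (PySem.List.pyGetD cmd 0 0 - 1))
      (some (PySem.List.pyGetD cmd 1 0))).length : Int)) :
    stepA array ans cmd = stepB array ans cmd := by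
  have hpr : PySem.List.pyRange 0 3 = [0, 1, 2] := by decide
  have hk2' : PySem.List.pyGetD cmd 2 0 ≤
      (((PySem.List.sorted (PySem.List.slice array (some (PySem.List.pyGetD cmd 0 0 - 1))
        (some (PySem.List.pyGetD cmd 1 0))) (fun x => x)).length : Int)) := by
    rw [PySem.List.length_sorted]
    exact hk2
  simp only [stepA, stepB, hpr, List.foldl_cons, List.foldl_nil]
  rw [buffer_eq _ _ (by omega), pick_eq _ _ hk1 hk2']

-- ===== VERDICT (by name: the statement is the Claim_ definition above) =====
theorem solution_spec : Claim_equal_solution := by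
  intro array commands _hdom hpre
  unfold Spec_solution solution solution_alt
  rw [PySem.List.foldl_pyRange_zero_pyGetD commands [] (stepA array) []]
  exact PySem.List.foldl_congr_mem commands _ _ []
    (fun ans cmd hmem => step_eq array cmd ans (hpre cmd hmem).2.1 (hpre cmd hmem).2.2)
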